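-- pv_equiv track=rewrite | github.com/Ashur5457/CUDA-Q | TWCC/latest/util_qmg.py | _can_sort_with_even_swaps
-- ===== SOURCE A (Python) =====
-- def _can_sort_with_even_swaps(list1, list2):
--     def count_inversions(lst):
--         inversions = 0
--         for i in range(len(lst)):
--             for j in range(i + 1, len(lst)):
--                 if lst[i] > lst[j]:
--                     inversions += 1
--         return inversions
--     inversions_list1 = count_inversions(list1)
--     inversions_list2 = count_inversions(list2)
--     return (inversions_list1 - inversions_list2) % 2 == 0
-- ===== SOURCE B (Python) =====
-- def _can_sort_with_even_swaps(list1, list2):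
--     def sort_count(lst):
--         n = len(lst)
--         if n <= 1:
--             return lst, 0
--         mid = n // 2
--         left, c1 = sort_count(lst[:mid])
--         right, c2 = sort_count(lst[mid:])
--         merged = []
--         inv = c1 + c2
--         i = j = 0
--         while i < len(left) and j < len(right):
--             if left[i] <= right[j]:
--                 merged.append(left[i])
--                 i += 1
--             else:
--                 merged.append(right[j])
--                 inv += len(left) - i
--                 j += 1
--         merged.extend(left[i:])
--         merged.extend(right[j:])
--         return merged, inv
--     return sort_count(list1)[1] % 2 == sort_count(list2)[1] % 2
-- ===== Notes on version B (the rewrite author's own statement) =====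
-- stated objective: faster
-- what changed: Replaces the O(n^2) nested-loop inversion count with merge-sort inversion counting for each list and compares the two parities directly.
import Mathlib
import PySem

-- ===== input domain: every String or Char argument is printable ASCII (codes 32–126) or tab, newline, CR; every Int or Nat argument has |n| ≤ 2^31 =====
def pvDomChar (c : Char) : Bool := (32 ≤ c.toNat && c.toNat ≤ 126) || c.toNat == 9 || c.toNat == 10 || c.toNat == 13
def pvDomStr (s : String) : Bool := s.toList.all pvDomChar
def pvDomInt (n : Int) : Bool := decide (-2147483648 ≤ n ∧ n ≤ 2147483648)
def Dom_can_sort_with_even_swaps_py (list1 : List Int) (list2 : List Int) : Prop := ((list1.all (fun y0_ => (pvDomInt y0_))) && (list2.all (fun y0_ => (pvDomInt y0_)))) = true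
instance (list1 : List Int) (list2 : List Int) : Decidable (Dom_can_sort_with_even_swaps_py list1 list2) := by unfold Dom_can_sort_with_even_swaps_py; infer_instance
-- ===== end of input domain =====

-- B replaces A's O(n^2) nested-loop inversion count by merge-sort inversion counting per list (objective: faster, asymptotic).

-- ===== PORT A =====
-- A's nested helper count_inversions: two index loops, compare lst[i] > lst[j]
def pvCountInversions (lst : List Int) : Int :=
  (PySem.List.pyRange 0 lst.length 1).foldl (fun inversions i =>
    (PySem.List.pyRange (i + 1) lst.length 1).foldl (fun inversions j =>
      if PySem.List.pyGetD lst i 0 > PySem.List.pyGetD lst j 0 then inversions + 1 else inversions)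
      inversions) 0

def can_sort_with_even_swaps_py (list1 : List Int) (list2 : List Int) : Bool :=
  PySem.Int.mod (pvCountInversions list1 - pvCountInversions list2) 2 == 0

-- ===== PORT B =====
-- the merge while-loop of Source B (remaining left/right lists; inv += len(left) - i)
def pvMergeCount : List Int → List Int → List Int × Nat
  | [], right => (right, 0)
  | left, [] => (left, 0)
  | x :: left, y :: right =>
    if x ≤ y then
      let p := pvMergeCount left (y :: right)
      (x :: p.1, p.2)
    else
      let p := pvMergeCount (x :: left) right
      (y :: p.1, p.2 + (x :: left).length)

-- Source B's sort_count: split at n // 2, recurse, merge with counting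
def pvSortCount (lst : List Int) : List Int × Nat :=
  if lst.length ≤ 1 then (lst, 0)
  else
    let mid := lst.length / 2
    let p1 := pvSortCount (lst.take mid)
    let p2 := pvSortCount (lst.drop mid)
    let m := pvMergeCount p1.1 p2.1
    (m.1, p1.2 + p2.2 + m.2)
termination_by lst.length
decreasing_by
  · simp; omega
  · simp; omega

def can_sort_with_even_swaps_py_alt (list1 : List Int) (list2 : List Int) : Bool :=
  (pvSortCount list1).2 % 2 == (pvSortCount list2).2 % 2

-- ===== PRECONDITION & SPEC =====
def Spec_can_sort_with_even_swaps_py (list1 : List Int) (list2 : List Int) (out : Bool) : Prop := out = can_sort_with_even_swaps_py_alt list1 list2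
instance (list1 : List Int) (list2 : List Int) (out : Bool) : Decidable (Spec_can_sort_with_even_swaps_py list1 list2 out) := by unfold Spec_can_sort_with_even_swaps_py; infer_instance

-- ===== CLAIM (what is proved, stated in full; the proofs are below) =====
def Claim_equal_can_sort_with_even_swaps_py : Prop := ∀ (list1 : List Int) (list2 : List Int), Dom_can_sort_with_even_swaps_py list1 list2 → Spec_can_sort_with_even_swaps_py list1 list2 (can_sort_with_even_swaps_py list1 list2)

-- ===== LEMMAS AND PROOFS =====

-- reference inversion count: for each head, count strictly smaller later elements
def pvInv : List Int → Nat
  | [] => 0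
  | x :: xs => xs.countP (fun y => decide (y < x)) + pvInv xs

-- cross inversions: pairs x ∈ a, y ∈ b with y < x
def pvCross (a b : List Int) : Nat := (a.map (fun x => b.countP (fun y => decide (y < x)))).sum

theorem pvCross_nil_right (a : List Int) : pvCross a [] = 0 := by
  simp [pvCross]

theorem pvCross_cons_left (x : Int) (a b : List Int) :
    pvCross (x :: a) b = b.countP (fun y => decide (y < x)) + pvCross a b := by
  simp [pvCross]

theorem pvCross_cons_right (a : List Int) (y : Int) (b : List Int) :
    pvCross a (y :: b) = a.countP (fun x => decide (y < x)) + pvCross a b := by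
  induction a with
  | nil => simp [pvCross]
  | cons z a ih =>
      simp [pvCross, List.countP_cons] at *
      omega

theorem pvInv_append (a b : List Int) :
    pvInv (a ++ b) = pvInv a + pvInv b + pvCross a b := by
  induction a with
  | nil => simp [pvInv, pvCross]
  | cons x a ih =>
      simp [pvInv, List.countP_append, ih, pvCross_cons_left]
      omega

theorem pvCross_perm_left {a a' : List Int} (b : List Int) (h : a.Perm a') :
    pvCross a b = pvCross a' b := by
  exact List.Perm.sum_eq (h.map _)

theorem pvCross_perm_right (a : List Int) {b b' : List Int} (h : b.Perm b') :
    pvCross a b = pvCross a b' := by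
  simp only [pvCross]
  exact congrArg _ (List.map_congr_left fun x _ => h.countP_eq _)

theorem pvMergeCount_spec : ∀ (a b : List Int), a.Sorted (· ≤ ·) → b.Sorted (· ≤ ·) →
    (pvMergeCount a b).1.Perm (a ++ b) ∧ (pvMergeCount a b).1.Sorted (· ≤ ·) ∧
      (pvMergeCount a b).2 = pvCross a b := by
  intro a b ha hb
  fun_induction pvMergeCount a b with
  | case1 right => simpa [pvCross] using hb
  | case2 left h => simpa [pvCross_nil_right] using ha
  | case3 x left y right hxy p ih =>
      rw [List.sorted_cons] at ha
      obtain ⟨hperm, hsort, hcnt⟩ := ih ha.2 hb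
      refine ⟨?_, ?_, ?_⟩
      · exact (hperm.cons x)
      · rw [List.sorted_cons]
        refine ⟨?_, hsort⟩
        intro z hz
        have hz' := hperm.mem_iff.mp hz
        rw [List.sorted_cons] at hb
        rcases List.mem_append.mp hz' with h1 | h2
        · exact ha.1 z h1
        · rcases List.mem_cons.mp h2 with rfl | h3
          · exact hxy
          · exact le_trans hxy (hb.1 z h3)
      · show p.2 = pvCross (x :: left) (y :: right)
        rw [hcnt, pvCross_cons_left]
        have : (y :: right).countP (fun z => decide (z < x)) = 0 := by
          rw [List.countP_eq_zero]
          intro z hz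
          rw [List.sorted_cons] at hb
          rcases List.mem_cons.mp hz with rfl | h3
          · simp; omega
          · have := hb.1 z h3; simp; omega
        omega
  | case4 x left y right hxy p ih =>
      rw [List.sorted_cons] at hb
      obtain ⟨hperm, hsort, hcnt⟩ := ih ha hb.2
      have hylt : y < x := by omega
      refine ⟨?_, ?_, ?_⟩
      · exact (hperm.cons y).trans List.perm_middle.symm
      · rw [List.sorted_cons]
        refine ⟨?_, hsort⟩
        intro z hz
        have hz' := hperm.mem_iff.mp hz
        rw [List.sorted_cons] at ha
        rcases List.mem_append.mp hz' with h1 | h2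
        · rcases List.mem_cons.mp h1 with rfl | h3
          · omega
          · have := ha.1 z h3; omega
        · exact hb.1 z h2
      · show p.2 + (x :: left).length = pvCross (x :: left) (y :: right)
        rw [hcnt, pvCross_cons_right]
        have : (x :: left).countP (fun z => decide (y < z)) = (x :: left).length := by
          rw [List.countP_eq_length]
          intro z hz
          rw [List.sorted_cons] at ha
          rcases List.mem_cons.mp hz with rfl | h3
          · simp; omega
          · have := ha.1 z h3; simp; omega
        omega

theorem pvInv_short {l : List Int} (h : l.length ≤ 1) : pvInv l = 0 := by
  match l, h with
  | [], _ => rfl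
  | [x], _ => simp [pvInv]

theorem pvSortCount_spec : ∀ l : List Int,
    (pvSortCount l).1.Perm l ∧ (pvSortCount l).1.Sorted (· ≤ ·) ∧ (pvSortCount l).2 = pvInv l := by
  intro l
  fun_induction pvSortCount l with
  | case1 l h =>
      refine ⟨List.Perm.refl l, ?_, (pvInv_short h).symm⟩
      match l, h with
      | [], _ => exact List.Pairwise.nil
      | [x], _ => exact List.pairwise_singleton _ _
  | case2 l h mid p1 p2 m ih1 ih2 =>
      obtain ⟨hp1, hs1, hc1⟩ := ih1
      obtain ⟨hp2, hs2, hc2⟩ := ih2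
      obtain ⟨hmp, hms, hmc⟩ := pvMergeCount_spec p1.1 p2.1 hs1 hs2
      refine ⟨?_, hms, ?_⟩
      · show m.1.Perm l
        have := hmp.trans (hp1.append hp2)
        rwa [List.take_append_drop] at this
      · show p1.2 + p2.2 + m.2 = pvInv l
        have hcross : pvCross p1.1 p2.1 = pvCross (l.take mid) (l.drop mid) := by
          rw [pvCross_perm_left _ hp1, pvCross_perm_right _ hp2]
        have := pvInv_append (l.take mid) (l.drop mid)
        rw [List.take_append_drop] at this
        rw [hc1, hc2, hmc, hcross]
        omega

-- A side: rewrite the nested index loops as a sum over range, then induct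
theorem pvSum_eq_inv : ∀ l : List Int,
    (((List.range l.length).map
      (fun k => (((l.drop (k + 1)).countP (fun y => decide (y < l.getD k 0))) : Int))).sum)
      = (pvInv l : Int) := by
  intro l
  induction l with
  | nil => simp [pvInv]
  | cons x xs ih =>
      rw [List.length_cons, List.range_succ_eq_map]
      simp only [List.map_cons, List.map_map, List.sum_cons]
      have htail : (List.range xs.length).map
          ((fun k => (((x :: xs).drop (k + 1)).countP (fun y => decide (y < (x :: xs).getD k 0)) : Int)) ∘ Nat.succ)
          = (List.range xs.length).map
          (fun k => (((xs.drop (k + 1)).countP (fun y => decide (y < xs.getD k 0))) : Int)) := by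
        apply List.map_congr_left
        intro k hk
        simp [Function.comp]
      rw [htail, ih]
      simp only [List.getD_cons_zero, List.drop_succ_cons, List.drop_zero, pvInv]
      push_cast
      ring

theorem pvCountInversions_eq (l : List Int) : pvCountInversions l = (pvInv l : Int) := by
  unfold pvCountInversions
  rw [PySem.List.foldl_congr_mem (g := fun acc i =>
        acc + (((l.drop (i + 1).toNat).countP (fun y => decide (y < PySem.List.pyGetD l i 0))) : Int))]
  · rw [PySem.List.foldl_add]
    rw [PySem.List.pyRange_zero_nat]
    simp only [List.map_map, zero_add]
    have : (List.range l.length).map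
        ((fun i => (((l.drop (i + 1).toNat).countP (fun y => decide (y < PySem.List.pyGetD l i 0))) : Int)) ∘ (fun k => ((k : Nat) : Int)))
        = (List.range l.length).map
        (fun k => (((l.drop (k + 1)).countP (fun y => decide (y < l.getD k 0))) : Int)) := by
      apply List.map_congr_left
      intro k hk
      simp [Function.comp]
    rw [this, pvSum_eq_inv]
  · intro acc i hi
    rw [PySem.List.mem_pyRange_one] at hi
    rw [PySem.List.foldl_pyRange_pyGetD' l 0 (fun acc y => if PySem.List.pyGetD l i 0 > y then acc + 1 else acc) acc (a := i + 1) (by omega)]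
    rw [PySem.List.foldl_ite_add_one]

theorem can_sort_with_even_swaps_py_parity (l1 l2 : List Int) :
    can_sort_with_even_swaps_py l1 l2 = can_sort_with_even_swaps_py_alt l1 l2 := by
  unfold can_sort_with_even_swaps_py can_sort_with_even_swaps_py_alt
  rw [pvCountInversions_eq, pvCountInversions_eq,
      (pvSortCount_spec l1).2.2, (pvSortCount_spec l2).2.2,
      PySem.Int.mod_eq_emod_of_pos (by omega : (0:Int) < 2)]
  rw [Bool.eq_iff_iff, beq_iff_eq, beq_iff_eq]
  omega

-- ===== VERDICT (by name: the statement is the Claim_ definition above) =====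
theorem can_sort_with_even_swaps_py_spec : Claim_equal_can_sort_with_even_swaps_py := by
  intro l1 l2 _
  exact can_sort_with_even_swaps_py_parity l1 l2
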